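-- pv_equiv track=rewrite | github.com/SaimLam/RobotTool | src/comau_model/extract_cod.py | extract_move_var_lines
-- ===== SOURCE A (Python) =====
-- def extract_move_var_lines(name: str, text: str) -> list[str]:
--     var_lines: list[str] = []
--     for line in text.split("\n"):
--         if line.strip() and not line.startswith("--"):
--             stripped_line = line.strip()
--             split_name = stripped_line.split()[0]
--             if split_name == name and not var_lines:
--                 var_lines.append(line)
--             elif len(var_lines) == 1 and stripped_line.startswith("X"):
--                 var_lines.append(line)
--             elif len(var_lines) == 2 and stripped_line.startswith("CNFG:"):
--                 var_lines.append(line)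
--     return var_lines
-- ===== SOURCE B (Python) =====
-- def extract_move_var_lines(name: str, text: str) -> list[str]:
--     qualifying = (line for line in text.split("\n")
--                   if line.strip() and not line.startswith("--"))
--     result: list[str] = []
--     for line in qualifying:
--         if line.strip().split()[0] == name:
--             result.append(line)
--             break
--     else:
--         return result
--     for line in qualifying:
--         if line.strip().startswith("X"):
--             result.append(line)
--             break
--     else:
--         return result
--     for line in qualifying:
--         if line.strip().startswith("CNFG:"):
--             result.append(line)
--             break
--     return result
-- ===== Notes on version B (the rewrite author's own statement) =====
-- stated objective: alternative
-- what changed: Replaced A's single fold carrying the growing result list (branching on its current length on every line) with three sequential phase scans over one shared iterator of qualifying lines, each phase consuming lines until its own match and returning the partial result early when the iterator is exhausted.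
import Mathlib
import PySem

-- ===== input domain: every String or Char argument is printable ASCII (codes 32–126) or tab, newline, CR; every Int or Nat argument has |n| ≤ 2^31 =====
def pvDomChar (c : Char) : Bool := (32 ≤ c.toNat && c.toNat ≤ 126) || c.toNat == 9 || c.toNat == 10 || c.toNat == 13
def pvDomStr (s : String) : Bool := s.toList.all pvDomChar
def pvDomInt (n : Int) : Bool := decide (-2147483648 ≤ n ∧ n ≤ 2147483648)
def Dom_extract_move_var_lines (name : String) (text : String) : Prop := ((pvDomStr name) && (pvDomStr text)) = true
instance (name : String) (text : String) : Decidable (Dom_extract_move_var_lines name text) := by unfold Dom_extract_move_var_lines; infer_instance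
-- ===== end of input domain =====

-- B's phased scan over one shared stream of qualifying lines replaces A's fold that
-- branches on the length of the growing result list; same O(n), alternative decomposition.
-- (Python's `stripped_line.split()[0]` is ported as `headD ""`: exact, since the guard
-- guarantees the stripped line is nonempty, so split() is nonempty.)

-- ===== PORT A =====
def pvStepA (name : String) (var_lines : List String) (line : String) : List String :=
  if PySem.Str.strip line != "" && !(PySem.Str.startswith line "--") then
    let stripped_line := PySem.Str.strip line
    let split_name := (PySem.Str.split₀ stripped_line).headD ""
    if split_name == name && var_lines.isEmpty then var_lines ++ [line]
    else if var_lines.length == 1 && PySem.Str.startswith stripped_line "X" then var_lines ++ [line]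
    else if var_lines.length == 2 && PySem.Str.startswith stripped_line "CNFG:" then var_lines ++ [line]
    else var_lines
  else var_lines

-- text.split("\n"): split? is `some` since the separator literal is nonempty; getD [] is exact
def extract_move_var_lines (name : String) (text : String) : List String :=
  ((PySem.Str.split? text "\n").getD []).foldl (pvStepA name) []

-- ===== PORT B =====
def pvQualifies (line : String) : Bool :=
  PySem.Str.strip line != "" && !(PySem.Str.startswith line "--")

-- one phase: consume lines from the shared stream until the predicate matches;
-- returns the matching line and the unconsumed rest of the stream
def pvFindRest (p : String → Bool) : List String → Option (String × List String)
  | [] => none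
  | l :: ls => if p l then some (l, ls) else pvFindRest p ls

def extract_move_var_lines_alt (name : String) (text : String) : List String :=
  let q := ((PySem.Str.split? text "\n").getD []).filter pvQualifies
  match pvFindRest (fun l => (PySem.Str.split₀ (PySem.Str.strip l)).headD "" == name) q with
  | none => []
  | some (l1, q1) =>
    l1 :: (match pvFindRest (fun l => PySem.Str.startswith (PySem.Str.strip l) "X") q1 with
      | none => []
      | some (l2, q2) =>
        l2 :: (match pvFindRest (fun l => PySem.Str.startswith (PySem.Str.strip l) "CNFG:") q2 with
          | none => []
          | some (l3, _) => [l3]))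

-- ===== PRECONDITION & SPEC =====
def Spec_extract_move_var_lines (name : String) (text : String) (out : List String) : Prop := out = extract_move_var_lines_alt name text
instance (name : String) (text : String) (out : List String) : Decidable (Spec_extract_move_var_lines name text out) := by unfold Spec_extract_move_var_lines; infer_instance

-- ===== CLAIM (what is proved, stated in full; the proofs are below) =====
def Claim_equal_extract_move_var_lines : Prop := ∀ (name : String) (text : String), Dom_extract_move_var_lines name text → Spec_extract_move_var_lines name text (extract_move_var_lines name text)

-- ===== LEMMAS AND PROOFS =====

-- the fold ignores non-qualifying lines, so it may run over the filtered list
theorem pvStepA_skip (name : String) (acc : List String) (line : String)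
    (h : pvQualifies line = false) : pvStepA name acc line = acc := by
  unfold pvQualifies at h
  unfold pvStepA
  simp only [h, Bool.false_eq_true, if_false]

theorem pvFold_filter (name : String) : ∀ (ls : List String) (acc : List String),
    ls.foldl (pvStepA name) acc = (ls.filter pvQualifies).foldl (pvStepA name) acc := by
  intro ls
  induction ls with
  | nil => intro acc; rfl
  | cons l ls ih =>
    intro acc
    by_cases h : pvQualifies l = true
    · simp [h, List.foldl_cons, ih]
    · simp only [Bool.not_eq_true] at h
      simp [h, List.foldl_cons, ih, pvStepA_skip name acc l h]

-- with three lines collected, the fold no longer changes its accumulator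
theorem pvFold_len3 (name : String) (a b c : String) : ∀ (q : List String),
    q.foldl (pvStepA name) [a, b, c] = [a, b, c] := by
  intro q
  induction q with
  | nil => rfl
  | cons l q ih =>
    have hstep : pvStepA name [a, b, c] l = [a, b, c] := by
      unfold pvStepA; split <;> simp
    simp [List.foldl_cons, hstep, ih]

-- phase 3: with two lines collected, the fold scans for the first "CNFG:" line
theorem pvFold_phase3 (name : String) (a b : String) : ∀ (q : List String),
    (∀ l ∈ q, pvQualifies l = true) →
    q.foldl (pvStepA name) [a, b] =
      [a, b] ++ (match pvFindRest (fun l => PySem.Str.startswith (PySem.Str.strip l) "CNFG:") q with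
        | none => []
        | some (l3, _) => [l3]) := by
  intro q
  induction q with
  | nil => intro _; rfl
  | cons l q ih =>
    intro hq
    have hl : pvQualifies l = true := hq l (List.mem_cons_self ..)
    unfold pvQualifies at hl
    obtain ⟨h1, h2⟩ : ¬ PySem.Str.strip l = "" ∧ PySem.Chars.startswith l.toList ['-', '-'] = false := by
      simpa using hl
    by_cases hc : PySem.Str.startswith (PySem.Str.strip l) "CNFG:" = true
    · have hc' : PySem.Chars.startswith (PySem.Chars.strip l.toList) ['C', 'N', 'F', 'G', ':'] = true := by
        simpa using hc
      have hstep : pvStepA name [a, b] l = [a, b, l] := by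
        unfold pvStepA; simp [h1, h2, hc']
      simp [List.foldl_cons, hstep, pvFold_len3, pvFindRest, hc']
    · simp only [Bool.not_eq_true] at hc
      have hc' : PySem.Chars.startswith (PySem.Chars.strip l.toList) ['C', 'N', 'F', 'G', ':'] = false := by
        simpa using hc
      have hstep : pvStepA name [a, b] l = [a, b] := by
        unfold pvStepA; simp [h1, h2, hc']
      simp only [List.foldl_cons, hstep, pvFindRest]
      simp [hc', ih (fun x hx => hq x (List.mem_cons_of_mem _ hx))]

-- phase 2: with one line collected, the fold scans for the first "X" line, then phase 3
theorem pvFold_phase2 (name : String) (a : String) : ∀ (q : List String),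
    (∀ l ∈ q, pvQualifies l = true) →
    q.foldl (pvStepA name) [a] =
      a :: (match pvFindRest (fun l => PySem.Str.startswith (PySem.Str.strip l) "X") q with
        | none => []
        | some (l2, q2) =>
          l2 :: (match pvFindRest (fun l => PySem.Str.startswith (PySem.Str.strip l) "CNFG:") q2 with
            | none => []
            | some (l3, _) => [l3])) := by
  intro q
  induction q with
  | nil => intro _; rfl
  | cons l q ih =>
    intro hq
    have hl : pvQualifies l = true := hq l (List.mem_cons_self ..)
    unfold pvQualifies at hl
    obtain ⟨h1, h2⟩ : ¬ PySem.Str.strip l = "" ∧ PySem.Chars.startswith l.toList ['-', '-'] = false := by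
      simpa using hl
    have hq' : ∀ x ∈ q, pvQualifies x = true := fun x hx => hq x (List.mem_cons_of_mem _ hx)
    by_cases hx : PySem.Str.startswith (PySem.Str.strip l) "X" = true
    · have hx' : PySem.Chars.startswith (PySem.Chars.strip l.toList) ['X'] = true := by
        simpa using hx
      have hstep : pvStepA name [a] l = [a, l] := by
        unfold pvStepA; simp [h1, h2, hx']
      have h3 := pvFold_phase3 name a l q hq'
      simp only [List.foldl_cons, hstep, pvFindRest]
      simp [hx', h3]
    · simp only [Bool.not_eq_true] at hx
      have hx' : PySem.Chars.startswith (PySem.Chars.strip l.toList) ['X'] = false := by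
        simpa using hx
      have hstep : pvStepA name [a] l = [a] := by
        unfold pvStepA; simp [h1, h2, hx']
      simp only [List.foldl_cons, hstep, pvFindRest]
      simp [hx', ih hq']

-- phase 1: from the empty accumulator, the fold scans for the name line, then phase 2
theorem pvFold_phase1 (name : String) : ∀ (q : List String),
    (∀ l ∈ q, pvQualifies l = true) →
    q.foldl (pvStepA name) [] =
      (match pvFindRest (fun l => (PySem.Str.split₀ (PySem.Str.strip l)).headD "" == name) q with
        | none => []
        | some (l1, q1) =>
          l1 :: (match pvFindRest (fun l => PySem.Str.startswith (PySem.Str.strip l) "X") q1 with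
            | none => []
            | some (l2, q2) =>
              l2 :: (match pvFindRest (fun l => PySem.Str.startswith (PySem.Str.strip l) "CNFG:") q2 with
                | none => []
                | some (l3, _) => [l3]))) := by
  intro q
  induction q with
  | nil => intro _; rfl
  | cons l q ih =>
    intro hq
    have hl : pvQualifies l = true := hq l (List.mem_cons_self ..)
    unfold pvQualifies at hl
    obtain ⟨h1, h2⟩ : ¬ PySem.Str.strip l = "" ∧ PySem.Chars.startswith l.toList ['-', '-'] = false := by
      simpa using hl
    have hq' : ∀ x ∈ q, pvQualifies x = true := fun x hx => hq x (List.mem_cons_of_mem _ hx)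
    by_cases hn : ((PySem.Str.split₀ (PySem.Str.strip l)).headD "" == name) = true
    · have hn' : (PySem.Str.split₀ (PySem.Str.strip l)).head?.getD "" = name := by
        simpa using hn
      have hstep : pvStepA name [] l = [l] := by
        unfold pvStepA; simp [h1, h2, hn']
      have hp2 := pvFold_phase2 name l q hq'
      simp only [List.foldl_cons, hstep, pvFindRest]
      simp [hn', hp2]
    · simp only [Bool.not_eq_true] at hn
      have hn' : ¬ (PySem.Str.split₀ (PySem.Str.strip l)).head?.getD "" = name := by
        simpa using hn
      have hstep : pvStepA name [] l = [] := by
        unfold pvStepA; simp [h1, h2, hn']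
      simp only [List.foldl_cons, hstep, pvFindRest]
      simp [hn', ih hq']

-- ===== VERDICT (by name: the statement is the Claim_ definition above) =====
theorem extract_move_var_lines_spec : Claim_equal_extract_move_var_lines := by
  intro name text _
  unfold Spec_extract_move_var_lines extract_move_var_lines extract_move_var_lines_alt
  rw [pvFold_filter]
  exact pvFold_phase1 name _ (fun l hl => (List.mem_filter.mp hl).2)
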